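-- pv_equiv track=rewrite | github.com/Excedrin/pytyle2 | pt/ptxcb/atom.py | null_terminated_to_strarray
-- ===== SOURCE A (Python) =====
-- def null_terminated_to_strarray(ords):
--     ret = []
--     s = ''
--
--     for o in ords:
--         if not o:
--             ret.append(s)
--             s = ''
--         else:
--             s += chr(o)
--
--     return ret
-- ===== SOURCE B (Python) =====
-- def null_terminated_to_strarray(ords):
--     return ''.join(map(chr, ords)).split('\x00')[:-1]
-- ===== Notes on version B (the rewrite author's own statement) =====
-- stated objective: idiomatic
-- what changed: Replaces the explicit accumulator loop with a single join of all decoded characters followed by a library split on NUL, dropping the final (unterminated) segment; Pre_ excludes ordinals where chr() raises (outside [0,0x10FFFF]) and surrogate ordinals, whose lone-surrogate result strings are not representable as Lean Strings (A and B return the identical value there).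
import Mathlib
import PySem

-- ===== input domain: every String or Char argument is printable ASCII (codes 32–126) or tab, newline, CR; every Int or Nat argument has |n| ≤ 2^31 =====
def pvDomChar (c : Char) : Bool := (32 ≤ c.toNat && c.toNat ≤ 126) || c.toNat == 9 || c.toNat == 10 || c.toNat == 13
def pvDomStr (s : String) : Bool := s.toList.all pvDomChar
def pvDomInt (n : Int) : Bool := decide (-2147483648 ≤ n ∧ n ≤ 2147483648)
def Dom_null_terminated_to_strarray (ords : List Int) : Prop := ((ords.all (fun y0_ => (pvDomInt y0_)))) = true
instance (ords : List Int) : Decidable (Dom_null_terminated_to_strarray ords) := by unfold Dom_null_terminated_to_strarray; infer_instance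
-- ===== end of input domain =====

-- B replaces A's accumulator loop with decode-all-then-split-on-NUL (drop last segment); idiomatic, same cost.


-- chr(o): both Pythons call chr; exact for valid (non-surrogate) scalar values, which Pre_ guarantees
def pvChr (o : Int) : Char := Char.ofNat o.toNat

-- ===== PORT A =====
-- the loop: state (ret, s); 'not o' is o == 0; strings kept as List Char (built with ++ [c] like s += chr(o))
def null_terminated_to_strarray (ords : List Int) : List String :=
  (ords.foldl
    (fun (st : List String × List Char) (o : Int) =>
      if o == 0 then (st.1 ++ [String.mk st.2], ([] : List Char))
      else (st.1, st.2 ++ [pvChr o]))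
    ([], [])).1

-- ===== PORT B =====
-- str.split('\x00') ported by hand over List Char (exact: splits at every NUL, keeps empty pieces)
def splitNul : List Char → List (List Char)
  | [] => [[]]
  | c :: cs => if c = Char.ofNat 0 then [] :: splitNul cs else (splitNul cs).modifyHead (c :: ·)

-- ''.join(map(chr, ords)).split('\x00')[:-1]
def null_terminated_to_strarray_alt (ords : List Int) : List String :=
  ((splitNul (ords.map pvChr)).dropLast).map String.mk

-- ===== PRECONDITION & SPEC =====
-- Pre_ excludes ordinals on which chr() raises ValueError (o < 0 or o > 0x10FFFF, so A raises), and
-- surrogate ordinals 0xD800–0xDFFF, where A returns a lone-surrogate string that is not representable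
-- as a Lean String (B returns the identical value there; see cites).
def Pre_null_terminated_to_strarray (ords : List Int) : Prop :=
  ∀ o ∈ ords, 0 ≤ o ∧ o ≤ 0x10FFFF ∧ ¬(0xD800 ≤ o ∧ o ≤ 0xDFFF)
instance (ords : List Int) : Decidable (Pre_null_terminated_to_strarray ords) := by
  unfold Pre_null_terminated_to_strarray; infer_instance
def pvWitness_null_terminated_to_strarray : List Int := [104, 105, 0, 120, 0, 1]

def Spec_null_terminated_to_strarray (ords : List Int) (out : List String) : Prop := out = null_terminated_to_strarray_alt ords
instance (ords : List Int) (out : List String) : Decidable (Spec_null_terminated_to_strarray ords out) := by unfold Spec_null_terminated_to_strarray; infer_instance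

-- ===== CLAIM (what is proved, stated in full; the proofs are below) =====
def Claim_equal_null_terminated_to_strarray : Prop := ∀ (ords : List Int), Dom_null_terminated_to_strarray ords → Pre_null_terminated_to_strarray ords → Spec_null_terminated_to_strarray ords (null_terminated_to_strarray ords)

-- ===== LEMMAS AND PROOFS =====

theorem splitNul_ne_nil (cs : List Char) : splitNul cs ≠ [] := by
  cases cs with
  | nil => simp [splitNul]
  | cons c cs =>
    simp only [splitNul]
    split
    · simp
    · cases h : splitNul cs with
      | nil => exact absurd h (splitNul_ne_nil cs)
      | cons a t => simp [List.modifyHead]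

theorem splitNul_no_nul (s : List Char) (h : Char.ofNat 0 ∉ s) : splitNul s = [s] := by
  induction s with
  | nil => rfl
  | cons c cs ih =>
    simp only [List.mem_cons, not_or] at h
    simp [splitNul, Ne.symm h.1, ih h.2, List.modifyHead]

theorem splitNul_append_nul (s t : List Char) (h : Char.ofNat 0 ∉ s) :
    splitNul (s ++ Char.ofNat 0 :: t) = s :: splitNul t := by
  induction s with
  | nil => simp [splitNul]
  | cons c cs ih =>
    simp only [List.mem_cons, not_or] at h
    simp only [List.cons_append, splitNul, if_neg (Ne.symm h.1), ih h.2, List.modifyHead]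

theorem pvChr_toNat (o : Int) (h0 : 0 ≤ o) (h1 : o ≤ 0x10FFFF) (hs : ¬(0xD800 ≤ o ∧ o ≤ 0xDFFF)) :
    (pvChr o).toNat = o.toNat := by
  have hv : Nat.isValidChar o.toNat := by
    unfold Nat.isValidChar
    omega
  simp [pvChr, Char.ofNat, hv]

theorem pvChr_ne_nul (o : Int) (h0 : 0 ≤ o) (h1 : o ≤ 0x10FFFF) (hs : ¬(0xD800 ≤ o ∧ o ≤ 0xDFFF))
    (hz : o ≠ 0) : pvChr o ≠ Char.ofNat 0 := by
  intro he
  have := pvChr_toNat o h0 h1 hs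
  rw [he] at this
  simp at this
  omega

theorem loop_eq (ords : List Int) :
    ∀ (ret : List String) (s : List Char),
    (∀ o ∈ ords, 0 ≤ o ∧ o ≤ 0x10FFFF ∧ ¬(0xD800 ≤ o ∧ o ≤ 0xDFFF)) →
    Char.ofNat 0 ∉ s →
    (ords.foldl
      (fun (st : List String × List Char) (o : Int) =>
        if o == 0 then (st.1 ++ [String.mk st.2], ([] : List Char))
        else (st.1, st.2 ++ [pvChr o]))
      (ret, s)).1
      = ret ++ ((splitNul (s ++ ords.map pvChr)).dropLast).map String.mk := by
  induction ords with
  | nil =>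
    intro ret s _ hns
    simp [splitNul_no_nul s hns]
  | cons o rest ih =>
    intro ret s hpre hns
    have hpo := hpre o (by simp)
    have hpr : ∀ o' ∈ rest, 0 ≤ o' ∧ o' ≤ 0x10FFFF ∧ ¬(0xD800 ≤ o' ∧ o' ≤ 0xDFFF) :=
      fun o' h => hpre o' (by simp [h])
    by_cases hz : o = 0
    · subst hz
      have hc : pvChr 0 = Char.ofNat 0 := rfl
      simp only [List.foldl_cons, List.map_cons, hc]
      rw [if_pos (by decide)]
      rw [ih (ret ++ [String.mk s]) [] hpr (by simp)]
      rw [splitNul_append_nul s _ hns,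
          List.dropLast_cons_of_ne_nil (splitNul_ne_nil _)]
      simp
    · have hcne : pvChr o ≠ Char.ofNat 0 := pvChr_ne_nul o hpo.1 hpo.2.1 hpo.2.2 hz
      simp only [List.foldl_cons, List.map_cons]
      rw [if_neg (by simp [hz])]
      rw [ih ret (s ++ [pvChr o]) hpr (by simp [hns, Ne.symm, hcne])]
      simp

-- ===== VERDICT (by name: the statement is the Claim_ definition above) =====
theorem null_terminated_to_strarray_spec : Claim_equal_null_terminated_to_strarray := by
  intro ords _ hpre
  unfold Spec_null_terminated_to_strarray null_terminated_to_strarray null_terminated_to_strarray_alt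
  rw [loop_eq ords [] [] hpre (by simp)]
  simp
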